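-- pv_equiv track=rewrite | github.com/awilliambauer/practicum | include/source/for_loop/for_loop_1.py | for_loop_investigation
-- ===== SOURCE A (Python) =====
-- def for_loop_investigation(start, end, step):
-- 	a = 4
-- 	b = 21
-- 	for i in range(start, end, step):
-- 		a = a + 6
-- 		if a > b:
-- 			b = b + 8
-- 	return (a, b)
-- ===== SOURCE B (Python) =====
-- def for_loop_investigation(start, end, step):
--     # closed form: a = 4 + 6n; b is periodic with period 4 after n = 3
--     n = len(range(start, end, step))
--     a = 4 + 6 * n
--     if n < 3:
--         b = 21
--     else:
--         q, r = divmod(n - 3, 4)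
--         b = 29 + 24 * q + (0, 0, 8, 16)[r]
--     return (a, b)
-- ===== Notes on version B (the rewrite author's own statement) =====
-- stated objective: faster
-- what changed: Replaces the O(n) simulation loop with an O(1) closed form: a = 4+6n from the iteration count n = len(range(start,end,step)), and b from the period-4 pattern of the overtaking condition.
import Mathlib
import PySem

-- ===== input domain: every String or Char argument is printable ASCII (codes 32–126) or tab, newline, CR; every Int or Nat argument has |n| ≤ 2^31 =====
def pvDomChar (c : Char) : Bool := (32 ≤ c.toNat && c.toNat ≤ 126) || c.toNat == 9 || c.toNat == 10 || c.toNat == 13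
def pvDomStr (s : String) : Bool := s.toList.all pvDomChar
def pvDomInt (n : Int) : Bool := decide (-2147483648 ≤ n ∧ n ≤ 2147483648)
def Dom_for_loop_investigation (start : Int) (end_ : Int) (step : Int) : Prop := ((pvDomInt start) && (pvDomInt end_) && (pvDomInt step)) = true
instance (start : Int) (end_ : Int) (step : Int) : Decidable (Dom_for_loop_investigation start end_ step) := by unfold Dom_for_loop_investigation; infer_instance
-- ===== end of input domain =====

-- B replaces A's O(n) simulation loop with an O(1) closed form (a = 4+6n; b from the period-4 overtake pattern).


-- ===== PORT A =====
-- one loop-body step of A: a += 6; if a > b: b += 8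
def pvStepA (ab : Int × Int) : Int × Int :=
  let a := ab.1 + 6
  if a > ab.2 then (a, ab.2 + 8) else (a, ab.2)

def for_loop_investigation (start : Int) (end_ : Int) (step : Int) : List Int :=
  let p := (PySem.List.pyRange start end_ step).foldl (fun ab _ => pvStepA ab) (4, 21)
  [p.1, p.2]

-- ===== PORT B =====
-- Source B's closed form for b after n iterations; divmod(n-3,4) on the nonnegative n-3 is Nat div/mod (exact there)
def pvBClosed (n : Nat) : Int :=
  if n < 3 then 21
  else
    let q := (n - 3) / 4
    let r := (n - 3) % 4
    29 + 24 * (q : Int) + (if r = 0 then 0 else if r = 1 then 0 else if r = 2 then 8 else 16)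

def for_loop_investigation_alt (start : Int) (end_ : Int) (step : Int) : List Int :=
  let n := (PySem.List.pyRange start end_ step).length
  [4 + 6 * (n : Int), pvBClosed n]

-- ===== PRECONDITION & SPEC =====
-- Pre_ excludes step = 0, where Python's range raises ValueError.
def Pre_for_loop_investigation (start : Int) (end_ : Int) (step : Int) : Prop := step ≠ 0
instance (start : Int) (end_ : Int) (step : Int) : Decidable (Pre_for_loop_investigation start end_ step) := by unfold Pre_for_loop_investigation; infer_instance
def pvWitness_for_loop_investigation : Int × Int × Int := (0, 10, 1)

def Spec_for_loop_investigation (start : Int) (end_ : Int) (step : Int) (out : List Int) : Prop := out = for_loop_investigation_alt start end_ step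
instance (start : Int) (end_ : Int) (step : Int) (out : List Int) : Decidable (Spec_for_loop_investigation start end_ step out) := by unfold Spec_for_loop_investigation; infer_instance

-- ===== CLAIM (what is proved, stated in full; the proofs are below) =====
def Claim_equal_for_loop_investigation : Prop := ∀ (start : Int) (end_ : Int) (step : Int), Dom_for_loop_investigation start end_ step → Pre_for_loop_investigation start end_ step → Spec_for_loop_investigation start end_ step (for_loop_investigation start end_ step)

-- ===== LEMMAS AND PROOFS =====

-- one loop step advances the closed form by one iteration
lemma pvStepA_closed (n : Nat) : pvStepA (4 + 6 * (n : Int), pvBClosed n) = (4 + 6 * ((n : Int) + 1), pvBClosed (n + 1)) := by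
  simp only [pvStepA, pvBClosed]
  split_ifs <;> refine Prod.ext ?_ ?_ <;> simp only [] <;> push_cast <;> omega

-- the fold over any list depends only on its length and equals the closed form
lemma pvFold_closed (l : List Int) (n : Nat) :
    l.foldl (fun ab _ => pvStepA ab) (4 + 6 * (n : Int), pvBClosed n)
      = (4 + 6 * ((n : Int) + l.length), pvBClosed (n + l.length)) := by
  induction l generalizing n with
  | nil => simp
  | cons x xs ih =>
      simp only [List.foldl_cons, pvStepA_closed, List.length_cons]
      have := ih (n + 1)
      push_cast at this ⊢
      rw [this]
      ring_nf

-- ===== VERDICT (by name: the statement is the Claim_ definition above) =====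
theorem for_loop_investigation_spec : Claim_equal_for_loop_investigation := by
  intro start end_ step _ _
  unfold Spec_for_loop_investigation for_loop_investigation for_loop_investigation_alt
  have h := pvFold_closed (PySem.List.pyRange start end_ step) 0
  norm_num [pvBClosed] at h
  simp [h, pvBClosed]
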